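-- pv_equiv track=rewrite | github.com/TUFLOW-Support/PyTuflow | pytuflow/_outputs/map_output.py | _replace_aliases
-- ===== SOURCE A (Python) =====
-- def _replace_aliases(filter_by: str) -> str:
--     """Replace aliases in the filter_by string."""
--     filter_by = [x.strip().lower() for x in filter_by.split('/')] if filter_by else []
--     while 'section' in filter_by:
--         filter_by.remove('section')
--     while 'curtain' in filter_by:
--         filter_by.remove('curtain')
--     while 'profile' in filter_by:
--         filter_by.remove('profile')
--     while 'line' in filter_by:
--         filter_by.remove('line')
--     while 'point' in filter_by:
--         filter_by.remove('point')
--     return '/'.join(filter_by)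
-- ===== SOURCE B (Python) =====
-- _EXCLUDED = {'section', 'curtain', 'profile', 'line', 'point'}
--
-- def _replace_aliases(filter_by: str) -> str:
--     """Replace aliases in the filter_by string."""
--     if not filter_by:
--         return ''
--     cleaned = (x.strip().lower() for x in filter_by.split('/'))
--     return '/'.join(w for w in cleaned if w not in _EXCLUDED)
-- ===== Notes on version B (the rewrite author's own statement) =====
-- stated objective: simpler
-- what changed: Replaces the five repeated-rescan `while alias in list: list.remove(alias)` loops with a single linear filtering pass against a constant set of excluded aliases.
import Mathlib
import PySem

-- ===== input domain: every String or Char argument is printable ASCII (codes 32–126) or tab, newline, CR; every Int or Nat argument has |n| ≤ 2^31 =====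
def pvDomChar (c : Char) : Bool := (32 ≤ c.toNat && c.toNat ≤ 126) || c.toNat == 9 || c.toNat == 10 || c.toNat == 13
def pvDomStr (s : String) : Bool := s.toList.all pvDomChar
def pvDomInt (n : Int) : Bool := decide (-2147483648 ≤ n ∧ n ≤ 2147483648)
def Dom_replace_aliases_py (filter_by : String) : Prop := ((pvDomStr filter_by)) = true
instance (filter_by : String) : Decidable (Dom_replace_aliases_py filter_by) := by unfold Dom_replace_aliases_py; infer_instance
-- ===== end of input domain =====

-- B replaces A's five repeated-rescan while/remove loops by one linear filtering pass
-- against a constant set of excluded aliases (objective: simpler).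

-- ===== PORT A =====
-- 'while v in l: l.remove(v)' — recursion on the list, one first-occurrence removal per step
def pvRemoveLoop (v : String) (l : List String) : List String :=
  if _h : l.contains v then
    pvRemoveLoop v ((PySem.List.remove? l v).getD l)
  else l
termination_by l.length
decreasing_by
  have hm : v ∈ l := by simpa using _h
  simp only [PySem.List.remove?_eq_some_erase l v hm, Option.getD_some,
    List.length_erase_of_mem hm]
  have := List.length_pos_of_mem hm
  omega

def replace_aliases_py (filter_by : String) : String :=
  let l0 : List String :=
    if filter_by = "" then []
    else ((PySem.Str.split? filter_by "/").getD []).map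
      (fun x => PySem.Str.lower (PySem.Str.strip x))
  let l1 := pvRemoveLoop "section" l0
  let l2 := pvRemoveLoop "curtain" l1
  let l3 := pvRemoveLoop "profile" l2
  let l4 := pvRemoveLoop "line" l3
  let l5 := pvRemoveLoop "point" l4
  PySem.Str.join "/" l5

-- ===== PORT B =====
def pvExcluded : PySem.Set String :=
  PySem.Set.ofList ["section", "curtain", "profile", "line", "point"]

def replace_aliases_py_alt (filter_by : String) : String :=
  if filter_by = "" then ""
  else
    let cleaned := ((PySem.Str.split? filter_by "/").getD []).map
      (fun x => PySem.Str.lower (PySem.Str.strip x))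
    PySem.Str.join "/" (cleaned.filter (fun w => !(PySem.Set.contains pvExcluded w)))

-- ===== PRECONDITION & SPEC =====
def Spec_replace_aliases_py (filter_by : String) (out : String) : Prop := out = replace_aliases_py_alt filter_by
instance (filter_by : String) (out : String) : Decidable (Spec_replace_aliases_py filter_by out) := by unfold Spec_replace_aliases_py; infer_instance

-- ===== CLAIM (what is proved, stated in full; the proofs are below) =====
def Claim_equal_replace_aliases_py : Prop := ∀ (filter_by : String), Dom_replace_aliases_py filter_by → Spec_replace_aliases_py filter_by (replace_aliases_py filter_by)

-- ===== LEMMAS AND PROOFS =====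

-- erasing the first occurrence of v then filtering v out equals filtering v out directly
lemma filter_erase_self (v : String) (l : List String) :
    (l.erase v).filter (fun w => w != v) = l.filter (fun w => w != v) := by
  induction l with
  | nil => simp
  | cons a t ih =>
    by_cases hav : a = v
    · subst hav; simp
    · simp [hav, ih]

-- the while/remove loop removes every occurrence, preserving order
lemma pvRemoveLoop_eq_filter (v : String) (l : List String) :
    pvRemoveLoop v l = l.filter (fun w => w != v) := by
  induction hn : l.length using Nat.strong_induction_on generalizing l with
  | _ n ih =>
    rw [pvRemoveLoop.eq_def]
    by_cases h : l.contains v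
    · have hm : v ∈ l := by simpa using h
      rw [dif_pos h, PySem.List.remove?_eq_some_erase l v hm, Option.getD_some,
        ih (l.erase v).length (by
          subst hn
          have h1 := List.length_erase_of_mem hm
          have h2 := List.length_pos_of_mem hm
          omega) _ rfl]
      exact filter_erase_self v l
    · rw [dif_neg h]
      have hne : ∀ w ∈ l, w ≠ v := fun w hw hwv =>
        h (by simpa [hwv] using List.elem_eq_true_of_mem hw)
      exact (List.filter_eq_self.mpr (fun w hw => by simpa using hne w hw)).symm

lemma chain_eq_filter (l : List String) :
    pvRemoveLoop "point" (pvRemoveLoop "line" (pvRemoveLoop "profile"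
      (pvRemoveLoop "curtain" (pvRemoveLoop "section" l)))) =
    l.filter (fun w => !(PySem.Set.contains pvExcluded w)) := by
  simp only [pvRemoveLoop_eq_filter, List.filter_filter]
  refine List.filter_congr (fun w _ => ?_)
  have hx : pvExcluded = ["section", "curtain", "profile", "line", "point"] := rfl
  rw [hx]
  rw [Bool.eq_iff_iff]
  simp [PySem.Set.contains, List.contains_eq_mem]
  tauto

-- ===== VERDICT (by name: the statement is the Claim_ definition above) =====
theorem replace_aliases_py_spec : Claim_equal_replace_aliases_py := by
  intro filter_by _
  unfold Spec_replace_aliases_py replace_aliases_py replace_aliases_py_alt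
  by_cases h : filter_by = ""
  · simp only [if_pos h, chain_eq_filter]; decide
  · simp only [if_neg h, chain_eq_filter]
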